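-- pv_equiv track=rewrite | github.com/acidgenomics/py-acidbase | src/acidbase/_data.py | match_all
-- ===== SOURCE A (Python) =====
-- from collections.abc import Hashable, Sequence
-- from typing import Any
--
-- def match_all(x: Sequence, table: Sequence) -> list[int]:
--     """Return indices of all matches of *x* in *table*.
--
--     Like R's ``match()`` but returns *all* positions, not just the
--     first.
--
--     Parameters
--     ----------
--     x : sequence
--         Values to look up.
--     table : sequence
--         Reference table.
--
--     Returns
--     -------
--     list[int]
--         0-based indices into *table*.
--
--     Raises
--     ------
--     KeyError
--         If any element in *x* is not found in *table*.
--     """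
--     lookup: dict[Any, list[int]] = {}
--     for i, val in enumerate(table):
--         lookup.setdefault(val, []).append(i)
--     result: list[int] = []
--     for val in x:
--         if val not in lookup:
--             raise KeyError(f"{val!r} not found in table")
--         result.extend(lookup[val])
--     return result
-- ===== SOURCE B (Python) =====
-- def match_all(x, table):
--     result = []
--     for val in x:
--         indices = [i for i, v in enumerate(table) if v == val]
--         if not indices:
--             raise KeyError(f"{val!r} not found in table")
--         result.extend(indices)
--     return result
-- ===== Notes on version B (the rewrite author's own statement) =====
-- stated objective: simpler
-- what changed: Dropped the precomputed value->indices lookup dict; B scans table directly per value of x with a comprehension, raising the same KeyError when no index matches.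
import Mathlib
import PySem

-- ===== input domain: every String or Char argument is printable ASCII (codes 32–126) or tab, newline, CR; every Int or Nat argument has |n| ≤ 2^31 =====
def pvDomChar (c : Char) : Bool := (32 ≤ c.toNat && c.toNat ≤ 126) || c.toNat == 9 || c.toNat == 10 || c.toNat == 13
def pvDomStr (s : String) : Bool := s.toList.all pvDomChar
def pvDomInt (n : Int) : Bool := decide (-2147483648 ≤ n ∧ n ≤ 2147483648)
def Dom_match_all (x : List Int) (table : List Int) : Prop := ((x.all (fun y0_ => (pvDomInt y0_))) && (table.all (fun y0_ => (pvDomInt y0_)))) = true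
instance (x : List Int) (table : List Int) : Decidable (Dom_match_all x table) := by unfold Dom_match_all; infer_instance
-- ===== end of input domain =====

-- B drops A's precomputed value->indices dict and instead scans table per value of x (same values, same KeyError point/message); equivalence is about the return value.

-- ===== PORT A =====
-- lookup = {}; for i, val in enumerate(table): lookup.setdefault(val, []).append(i)
-- result = []; for val in x: (raise KeyError if val not in lookup — excluded by Pre_) result.extend(lookup[val])
def match_all (x : List Int) (table : List Int) : List Int :=
  let lookup : PySem.Dict Int (List Int) :=
    (PySem.List.enumerate table).foldl (fun d p => d.modify p.2 [] (· ++ [p.1])) PySem.Dict.empty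
  x.foldl (fun result val => result ++ lookup.getD val []) []

-- ===== PORT B =====
-- result = []; for val in x: indices = [i for i, v in enumerate(table) if v == val];
--   (raise KeyError if indices == [] — excluded by Pre_); result.extend(indices)
def match_all_alt (x : List Int) (table : List Int) : List Int :=
  x.foldl (fun result val =>
    result ++ ((PySem.List.enumerate table).filter (fun p => p.2 == val)).map (·.1)) []

-- ===== PRECONDITION & SPEC =====
-- Pre_ excludes exactly the inputs on which Python A raises KeyError (a value of x absent from table); B raises the same KeyError there.
def Pre_match_all (x : List Int) (table : List Int) : Prop := ∀ v ∈ x, v ∈ table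
instance (x : List Int) (table : List Int) : Decidable (Pre_match_all x table) := by unfold Pre_match_all; infer_instance
def pvWitness_match_all : List Int × List Int := ([1, 2, 1], [2, 1, 1, 3])
def Spec_match_all (x : List Int) (table : List Int) (out : List Int) : Prop := out = match_all_alt x table
instance (x : List Int) (table : List Int) (out : List Int) : Decidable (Spec_match_all x table out) := by unfold Spec_match_all; infer_instance

-- ===== CLAIM (what is proved, stated in full; the proofs are below) =====
def Claim_equal_match_all : Prop := ∀ (x : List Int) (table : List Int), Dom_match_all x table → Pre_match_all x table → Spec_match_all x table (match_all x table)

-- ===== LEMMAS AND PROOFS =====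

-- A's dict lookup at any value equals B's direct scan of table.
theorem lookup_getD_eq (table : List Int) (val : Int) :
    ((PySem.List.enumerate table).foldl (fun d p => d.modify p.2 [] (· ++ [p.1]))
        (PySem.Dict.empty : PySem.Dict Int (List Int))).getD val []
      = ((PySem.List.enumerate table).filter (fun p => p.2 == val)).map (·.1) := by
  have h : (PySem.List.enumerate table).foldl (fun d p => d.modify p.2 [] (· ++ [p.1]))
        (PySem.Dict.empty : PySem.Dict Int (List Int))
      = ((PySem.List.enumerate table).map Prod.swap).foldl
          (fun d p => d.modify p.1 [] (· ++ [p.2])) PySem.Dict.empty := by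
    rw [List.foldl_map]
    rfl
  rw [h, PySem.Dict.getD_foldl_modify_append]
  simp [List.filter_map, List.map_map, Function.comp_def, Prod.swap]

-- ===== VERDICT (by name: the statement is the Claim_ definition above) =====
theorem match_all_spec : Claim_equal_match_all := by
  intro x table _ _
  unfold Spec_match_all match_all match_all_alt
  simp only [lookup_getD_eq]
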